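-- pv_equiv track=rewrite | github.com/Uttejreddy0496/Methods-and-Tools-for-Software-Engineering | functs.py | dup_coor_check
-- ===== SOURCE A (Python) =====
-- def dup_coor_check(z):
--             for i in z.keys():
--                         c=len(z[i])-len(list(set(map(tuple,z[i]))))
--                         if c!=0:
--                                     r=1
--                                     break
--                         else:
--                                     r=0
--             return r
-- ===== SOURCE B (Python) =====
-- def dup_coor_check(z):
--     for coords in z.values():
--         seen = set()
--         for item in coords:
--             t = tuple(item)
--             if t in seen:
--                 return 1
--             seen.add(t)
--         r = 0
--     return r
-- ===== Notes on version B (the rewrite author's own statement) =====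
-- stated objective: alternative
-- what changed: Instead of building the whole set of tuples per value and comparing its size with the list length, B scans each coordinate list once with an incremental 'seen' set and returns 1 the moment any tuple repeats (early exit inside the list), setting r=0 only after a clean full list.
import Mathlib
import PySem

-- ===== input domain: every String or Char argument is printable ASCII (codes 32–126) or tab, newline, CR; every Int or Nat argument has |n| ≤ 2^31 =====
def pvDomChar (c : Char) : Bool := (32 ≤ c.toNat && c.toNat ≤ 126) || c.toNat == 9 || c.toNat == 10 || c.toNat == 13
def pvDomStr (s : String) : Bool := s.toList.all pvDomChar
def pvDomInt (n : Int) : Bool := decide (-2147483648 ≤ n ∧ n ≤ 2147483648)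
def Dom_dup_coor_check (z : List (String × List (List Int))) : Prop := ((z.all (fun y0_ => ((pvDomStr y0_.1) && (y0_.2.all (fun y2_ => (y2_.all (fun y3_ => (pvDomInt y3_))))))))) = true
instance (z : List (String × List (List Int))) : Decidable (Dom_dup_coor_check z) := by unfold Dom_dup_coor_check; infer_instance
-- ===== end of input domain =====

-- B replaces A's per-key "build the whole set of tuples, then compare its size with the list
-- length" by a single incremental scan with a 'seen' set that returns 1 on the first repeated
-- tuple (alternative decomposition, early exit); same value on every nonempty dict.

-- ===== PORT A =====
-- for i in z.keys(): c = len(z[i]) - len(set(map(tuple, z[i]))); if c != 0: r = 1; break; else: r = 0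
-- state = the Option Int holding r (none = r not yet assigned)
def dupCoorLoopA (d : PySem.Dict String (List (List Int))) : List String → Option Int → Option Int
  | [], r => r
  | i :: rest, _ =>
      let v := d.getD i []
      let c : Int := (v.length : Int) - (((PySem.Set.ofList v).length : Int))
      if c ≠ 0 then some 1
      else dupCoorLoopA d rest (some 0)

def dup_coor_check (z : List (String × List (List Int))) : Int :=
  match dupCoorLoopA (PySem.Dict.ofList z) (PySem.Dict.ofList z).keys none with
  | some r => r
  | none => 0  -- Python raises UnboundLocalError here (empty dict); excluded by Pre_

-- ===== PORT B =====
-- inner scan: for item in coords: t = tuple(item); if t in seen: return 1; seen.add(t)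
def dupSeenScan (seen : PySem.Set (List Int)) : List (List Int) → Bool
  | [] => false
  | t :: rest => if t ∈ seen then true else dupSeenScan (PySem.Set.add seen t) rest

def dupCoorLoopB : List (List (List Int)) → Int
  | [] => 0  -- Python raises UnboundLocalError on an empty dict; excluded by Pre_
  | coords :: rest => if dupSeenScan PySem.Set.empty coords then 1 else dupCoorLoopB rest

def dup_coor_check_alt (z : List (String × List (List Int))) : Int :=
  dupCoorLoopB (PySem.Dict.ofList z).values

-- ===== PRECONDITION & SPEC =====
-- On the empty dict both A and B raise UnboundLocalError (r never assigned), so Pre_ excludes z = [].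
def Pre_dup_coor_check (z : List (String × List (List Int))) : Prop := z ≠ []
instance (z : List (String × List (List Int))) : Decidable (Pre_dup_coor_check z) := by unfold Pre_dup_coor_check; infer_instance
def pvWitness_dup_coor_check : (List (String × List (List Int))) := [("a", [[1, 2], [3, 4]])]

def Spec_dup_coor_check (z : List (String × List (List Int))) (out : Int) : Prop := out = dup_coor_check_alt z
instance (z : List (String × List (List Int))) (out : Int) : Decidable (Spec_dup_coor_check z out) := by unfold Spec_dup_coor_check; infer_instance

-- ===== CLAIM (what is proved, stated in full; the proofs are below) =====
def Claim_equal_dup_coor_check : Prop := ∀ (z : List (String × List (List Int))), Dom_dup_coor_check z → Pre_dup_coor_check z → Spec_dup_coor_check z (dup_coor_check z)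

-- ===== LEMMAS AND PROOFS =====

-- set(map(tuple, v)) has the same size as v exactly when v has no duplicate coordinate
theorem ofList_length_eq_iff (v : List (List Int)) :
    (PySem.Set.ofList v).length = v.length ↔ v.Nodup := by
  constructor
  · intro h
    have hperm : (PySem.Set.ofList v).Perm v.dedup := by
      refine (List.perm_ext_iff_of_nodup (PySem.Set.nodup_ofList v) (List.nodup_dedup v)).mpr ?_
      intro x; simp [PySem.Set.mem_ofList, List.mem_dedup]
    have hlen : v.dedup.length = v.length := by
      rw [← hperm.length_eq, h]
    have := (List.dedup_sublist v).eq_of_length hlen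
    rw [← this]; exact List.nodup_dedup v
  · intro h; rw [PySem.Set.ofList_eq_self_of_nodup v h]

-- the incremental seen-scan fires exactly when seen ++ v has a repeat
theorem dupSeenScan_iff (v : List (List Int)) :
    ∀ (seen : PySem.Set (List Int)), seen.Nodup →
      (dupSeenScan seen v = true ↔ ¬ (seen ++ v).Nodup) := by
  induction v with
  | nil => intro seen hs; simp [dupSeenScan, hs]
  | cons t rest ih =>
    intro seen hs
    by_cases ht : t ∈ seen
    · have hnot : ¬ (seen ++ t :: rest).Nodup := by
        intro hnd
        have h2 := List.nodup_iff_count_le_one.mp hnd t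
        have h1 : 0 < seen.count t := List.count_pos_iff.mpr ht
        rw [List.count_append] at h2
        simp [List.count_cons_self] at h2
        omega
      simp [dupSeenScan, ht, hnot]
    · have hadd : PySem.Set.add seen t = seen ++ [t] := PySem.Set.add_of_not_mem ht
      have hnd' : (seen ++ [t]).Nodup := by
        rw [List.nodup_append]
        refine ⟨hs, List.nodup_singleton t, ?_⟩
        intro x hx y hy
        rw [List.mem_singleton] at hy
        subst hy
        exact fun h => ht (h ▸ hx)
      rw [show dupSeenScan seen (t :: rest) = dupSeenScan (PySem.Set.add seen t) rest from by
        simp [dupSeenScan, ht]]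
      rw [hadd, ih (seen ++ [t]) hnd', List.append_assoc, List.singleton_append]

-- A's loop over the keys equals B's loop over the corresponding values, for a nonempty key list
theorem loopA_eq_loopB (d : PySem.Dict String (List (List Int))) :
    ∀ (ks : List String) (r : Option Int), ks ≠ [] →
      dupCoorLoopA d ks r = some (dupCoorLoopB (ks.map (fun k => d.getD k []))) := by
  intro ks
  induction ks with
  | nil => intro r h; exact absurd rfl h
  | cons i rest ih =>
    intro r _
    have hcond : ((((d.getD i []).length : Int) - (((PySem.Set.ofList (d.getD i [])).length : Int))) ≠ 0)
        ↔ dupSeenScan PySem.Set.empty (d.getD i []) = true := by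
      rw [dupSeenScan_iff _ PySem.Set.empty List.nodup_nil]
      have h1 := ofList_length_eq_iff (d.getD i [])
      constructor
      · intro hne hnd
        apply hne
        rw [h1.mpr hnd]
        simp
      · intro hnodup h0
        apply hnodup
        have heq : (PySem.Set.ofList (d.getD i [])).length = (d.getD i []).length := by omega
        exact h1.mp heq
    by_cases hc : (((d.getD i []).length : Int) - (((PySem.Set.ofList (d.getD i [])).length : Int))) ≠ 0
    · simp only [dupCoorLoopA, dupCoorLoopB, List.map_cons, if_pos hc, if_pos (hcond.mp hc)]
    · have hb : ¬ dupSeenScan PySem.Set.empty (d.getD i []) = true := fun h => hc (hcond.mpr h)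
      simp only [dupCoorLoopA, dupCoorLoopB, List.map_cons, if_neg hc, if_neg hb]
      cases rest with
      | nil => simp [dupCoorLoopA, dupCoorLoopB]
      | cons j rest' => exact ih (some 0) (by simp)

theorem ofList_eq_foldl_insert (ps : List (String × List (List Int))) :
    PySem.Dict.ofList ps = ps.foldl (fun d p => d.insert p.1 p.2) PySem.Dict.empty := rfl

theorem keys_ofList_eq (ps : List (String × List (List Int))) :
    (PySem.Dict.ofList ps).keys = PySem.Set.ofList (ps.map Prod.fst) := by
  rw [ofList_eq_foldl_insert]
  rw [PySem.Dict.keys_foldl_insert_key ps Prod.fst (fun d p => p.2) PySem.Dict.empty]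
  simp [PySem.Dict.keys_empty, PySem.Set.update_nil_left]

-- ===== VERDICT (by name: the statement is the Claim_ definition above) =====
theorem dup_coor_check_spec : Claim_equal_dup_coor_check := by
  intro z _ hpre
  unfold Spec_dup_coor_check dup_coor_check dup_coor_check_alt
  have hnd := PySem.Dict.nodup_keys_ofList z
  have hkeys : (PySem.Dict.ofList z).keys ≠ [] := by
    rcases z with _ | ⟨⟨k, v⟩, zs⟩
    · exact absurd rfl hpre
    · have hk : k ∈ (PySem.Dict.ofList ((k, v) :: zs)).keys := by
        rw [keys_ofList_eq]
        rw [PySem.Set.mem_ofList]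
        simp
      exact List.ne_nil_of_mem hk
  rw [PySem.Dict.values_eq_map_keys _ hnd []]
  rw [loopA_eq_loopB (PySem.Dict.ofList z) _ none hkeys]
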